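-- pv_equiv track=rewrite | github.com/glutanimate/codewars | Python/7kyu/check_list_properties.py | is_inertial
-- ===== SOURCE A (Python) =====
-- def is_inertial(arr):
--     """Maximize performance by only iterating once over array"""
--     maxnr_odd = minnr_odd = maxnr_even = maxnr2nd_even = None
--
--     for nr in arr:
--         if nr % 2 == 0:
--             if maxnr_even is None:
--                 maxnr_even = nr
--             elif nr > maxnr_even:
--                 maxnr2nd_even, maxnr_even = maxnr_even, nr
--             elif maxnr2nd_even is None or maxnr2nd_even < nr:
--                 maxnr2nd_even = nr
--         else:
--             if minnr_odd is None or minnr_odd > nr: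
--                 minnr_odd = nr
--             if maxnr_odd is None or maxnr_odd < nr:
--                 maxnr_odd = nr
--
--     return (maxnr_even is not None and maxnr_odd is not None and minnr_odd is not None
--             and maxnr_odd < maxnr_even and (maxnr2nd_even is None or minnr_odd > maxnr2nd_even))
-- ===== SOURCE B (Python) =====
-- def is_inertial(arr):
--     """Partition-then-aggregate: filter evens/odds, use max/min/count builtins."""
--     evens = [x for x in arr if x % 2 == 0]
--     odds = [x for x in arr if x % 2 != 0]
--     if not evens or not odds:
--         return False
--     m1 = max(evens)
--     if evens.count(m1) >= 2:
--         m2 = m1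
--     else:
--         smaller = [x for x in evens if x < m1]
--         m2 = max(smaller) if smaller else None
--     return max(odds) < m1 and (m2 is None or min(odds) > m2)
-- ===== Notes on version B (the rewrite author's own statement) =====
-- stated objective: simpler
-- what changed: Replaced A's single-pass state machine tracking min/max odd and max/second-max even in four mutable variables by a partition-then-aggregate decomposition: filter evens and odds, then use max/min/count builtins to get the extrema and the second-largest even (counting duplicate maxima).
import Mathlib
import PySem

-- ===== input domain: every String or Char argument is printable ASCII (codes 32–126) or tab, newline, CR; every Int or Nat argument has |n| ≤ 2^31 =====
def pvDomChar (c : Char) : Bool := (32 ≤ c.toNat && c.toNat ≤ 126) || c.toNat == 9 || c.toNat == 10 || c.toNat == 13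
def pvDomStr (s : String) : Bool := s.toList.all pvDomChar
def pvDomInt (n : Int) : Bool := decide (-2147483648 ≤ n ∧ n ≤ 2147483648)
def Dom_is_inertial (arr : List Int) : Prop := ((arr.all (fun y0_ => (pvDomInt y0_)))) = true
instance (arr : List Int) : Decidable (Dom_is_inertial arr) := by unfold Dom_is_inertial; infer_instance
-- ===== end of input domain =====

-- B replaces A's one-pass incremental min/max/second-max state machine by a
-- partition-then-aggregate decomposition (filter evens/odds, then max/min/count);
-- objective: simpler. Same return value on every input.

-- ===== PORT A =====
-- one loop step of A: state = (maxnr_odd, minnr_odd, maxnr_even, maxnr2nd_even)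
def isInertialStep (s : Option Int × Option Int × Option Int × Option Int) (nr : Int) :
    Option Int × Option Int × Option Int × Option Int :=
  match s with
  | (maxOdd, minOdd, maxEven, max2Even) =>
    if PySem.Int.mod nr 2 == 0 then
      match maxEven with
      | none => (maxOdd, minOdd, some nr, max2Even)
      | some me =>
        if nr > me then (maxOdd, minOdd, some nr, some me)
        else
          match max2Even with
          | none => (maxOdd, minOdd, some me, some nr)
          | some m2 => if m2 < nr then (maxOdd, minOdd, some me, some nr)
                       else (maxOdd, minOdd, some me, some m2)
    else
      let minOdd' := match minOdd with
        | none => some nr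
        | some mi => if mi > nr then some nr else some mi
      let maxOdd' := match maxOdd with
        | none => some nr
        | some ma => if ma < nr then some nr else some ma
      (maxOdd', minOdd', maxEven, max2Even)

def is_inertial (arr : List Int) : Bool :=
  match arr.foldl isInertialStep (none, none, none, none) with
  | (maxOdd, minOdd, maxEven, max2Even) =>
    match maxEven, maxOdd, minOdd with
    | some me, some ma, some mi =>
      decide (ma < me) && (match max2Even with
                           | none => true
                           | some m2 => decide (mi > m2))
    | _, _, _ => false

-- ===== PORT B =====
def is_inertial_alt (arr : List Int) : Bool :=
  let evens := arr.filter (fun x => PySem.Int.mod x 2 == 0)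
  let odds := arr.filter (fun x => PySem.Int.mod x 2 != 0)
  if evens.isEmpty || odds.isEmpty then false
  else
    -- evens and odds are nonempty here, so each Option below is some _
    (PySem.List.max? evens (fun y => y)).elim false (fun m1 =>
      let m2 : Option Int :=
        if 2 ≤ PySem.List.count evens m1 then some m1
        else PySem.List.max? (evens.filter (fun x => decide (x < m1))) (fun y => y)
      (PySem.List.max? odds (fun y => y)).elim false (fun ma =>
        (PySem.List.min? odds (fun y => y)).elim false (fun mi =>
          decide (ma < m1) && m2.all (fun v => decide (mi > v)))))

-- ===== PRECONDITION & SPEC =====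
def Spec_is_inertial (arr : List Int) (out : Bool) : Prop := out = is_inertial_alt arr
instance (arr : List Int) (out : Bool) : Decidable (Spec_is_inertial arr out) := by unfold Spec_is_inertial; infer_instance

-- ===== CLAIM (what is proved, stated in full; the proofs are below) =====
def Claim_equal_is_inertial : Prop := ∀ (arr : List Int), Dom_is_inertial arr → Spec_is_inertial arr (is_inertial arr)

-- ===== LEMMAS AND PROOFS =====

-- the second-largest-even value B computes, as a standalone function (proof helper)
def snd2 (es : List Int) : Option Int :=
  match PySem.List.max? es (fun y => y) with
  | none => none
  | some m1 =>
    if 2 ≤ PySem.List.count es m1 then some m1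
    else PySem.List.max? (es.filter (fun x => decide (x < m1))) (fun y => y)

lemma max?_id_append_singleton (l : List Int) (x : Int) :
    PySem.List.max? (l ++ [x]) (fun y => y) =
      some (match PySem.List.max? l (fun y => y) with | none => x | some m => max m x) := by
  cases l with
  | nil => simp [PySem.List.max?]
  | cons y t =>
    rw [List.cons_append, PySem.List.max?_id_cons, PySem.List.max?_id_cons]
    simp [List.foldl_append]

lemma min?_id_append_singleton (l : List Int) (x : Int) :
    PySem.List.min? (l ++ [x]) (fun y => y) =
      some (match PySem.List.min? l (fun y => y) with | none => x | some m => min m x) := by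
  cases l with
  | nil => simp [PySem.List.min?]
  | cons y t =>
    rw [List.cons_append, PySem.List.min?_id_cons, PySem.List.min?_id_cons]
    simp [List.foldl_append]

lemma snd2_append (es : List Int) (x : Int) :
    snd2 (es ++ [x]) =
      match PySem.List.max? es (fun y => y) with
      | none => snd2 es
      | some me =>
        if me < x then some me
        else match snd2 es with
          | none => some x
          | some m2 => if m2 < x then some x else some m2 := by
  cases hE : PySem.List.max? es (fun y => y) with
  | none =>
    have hes : es = [] := (PySem.List.max?_eq_none_iff _ _).mp hE
    subst hes
    simp [snd2, PySem.List.max?, PySem.List.count]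
  | some me =>
    have hmem := PySem.List.max?_mem hE
    have hmax := PySem.List.max?_isMax hE
    simp only [] at hmax
    unfold snd2
    rw [max?_id_append_singleton, hE]
    simp only [show (match some me with | none => x | some m => max m x : Int) = max me x from rfl]
    by_cases hlt : me < x
    · -- new max is x, count of x in es++[x] is 1
      have hxmax : max me x = x := by omega
      have hnot : x ∉ es := fun h => absurd (hmax x h) (by omega)
      have hcnt : PySem.List.count (es ++ [x]) x = 1 := by
        simp [PySem.List.count_eq, List.count_append, List.count_eq_zero.mpr hnot]
      have hfilt : (es ++ [x]).filter (fun y => decide (y < x)) = es := by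
        rw [List.filter_append]
        simp only [List.filter_cons, List.filter_nil]
        rw [List.filter_eq_self.mpr (fun y hy => by simpa using lt_of_le_of_lt (hmax y hy) hlt)]
        simp
      simp only [hxmax, hcnt, hfilt]
      simp [hlt, hE]
    · -- x ≤ me: max unchanged
      have hxmax : max me x = me := by omega
      simp only [hxmax, if_neg hlt]
      have hcnt1 : 1 ≤ List.count me es := List.one_le_count_iff.mpr hmem
      by_cases hxe : x = me
      · subst hxe
        have hcnt : 2 ≤ PySem.List.count (es ++ [x]) x := by
          simp [PySem.List.count_eq, List.count_append]; omega
        rw [if_pos hcnt]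
        by_cases hc : 2 ≤ PySem.List.count es x
        · simp only [PySem.List.count_eq] at hc
          simp [hc]
        · rw [if_neg hc]
          cases hT : PySem.List.max? (es.filter (fun y => decide (y < x))) (fun y => y) with
          | none => simp
          | some m2 =>
            have := List.of_mem_filter (PySem.List.max?_mem hT)
            simp only [decide_eq_true_eq] at this
            simp [this]
      · have hxlt : x < me := by omega
        have hcnt : PySem.List.count (es ++ [x]) me = PySem.List.count es me := by
          have h0 : List.count me [x] = 0 := List.count_eq_zero.mpr (by simp [Ne.symm hxe])
          simp [PySem.List.count_eq, List.count_append, h0]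
        rw [hcnt]
        by_cases hc : 2 ≤ PySem.List.count es me
        · simp only [PySem.List.count_eq] at hc
          simp [hc, hlt]
        · rw [if_neg hc, if_neg hc]
          have hfilt : (es ++ [x]).filter (fun y => decide (y < me)) =
              es.filter (fun y => decide (y < me)) ++ [x] := by
            simp [List.filter_append, hxlt]
          rw [hfilt, max?_id_append_singleton]
          cases hT : PySem.List.max? (es.filter (fun y => decide (y < me))) (fun y => y) with
          | none => simp
          | some m2 =>
            simp only []
            by_cases hm2 : m2 < x
            · simp [hm2, max_eq_right (le_of_lt hm2)]
            · simp [hm2, max_eq_left (by omega : x ≤ m2)]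


-- the invariant: A's loop state over l, in terms of B's aggregates of the two filters
lemma fold_state_eq (l : List Int) :
    l.foldl isInertialStep (none, none, none, none) =
      (PySem.List.max? (l.filter (fun x => PySem.Int.mod x 2 != 0)) (fun y => y),
       PySem.List.min? (l.filter (fun x => PySem.Int.mod x 2 != 0)) (fun y => y),
       PySem.List.max? (l.filter (fun x => PySem.Int.mod x 2 == 0)) (fun y => y),
       snd2 (l.filter (fun x => PySem.Int.mod x 2 == 0))) := by
  induction l using List.reverseRecOn with
  | nil => simp [snd2, PySem.List.max?, PySem.List.min?]
  | append_singleton l x ih =>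
    rw [List.foldl_append, List.foldl_cons, List.foldl_nil, ih]
    by_cases hx : (PySem.Int.mod x 2 == 0) = true
    · -- x is even: odd components unchanged, even max / second-max updated
      have hodd : ((PySem.Int.mod x 2 != 0) = false) := by
        simp only [bne, hx, Bool.not_true]
      simp only [List.filter_append, List.filter_cons, List.filter_nil, hx, hodd, if_true]
      rw [max?_id_append_singleton, snd2_append]
      simp only [isInertialStep, hx, if_true]
      cases hE : PySem.List.max? (List.filter (fun x => PySem.Int.mod x 2 == 0) l)
          (fun y => y) with
      | none => simp
      | some me =>
        simp only []
        by_cases hlt : me < x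
        · simp [gt_iff_lt, hlt, max_eq_right (le_of_lt hlt)]
        · simp only [gt_iff_lt, if_neg hlt, max_eq_left (by omega : x ≤ me)]
          cases snd2 (List.filter (fun x => PySem.Int.mod x 2 == 0) l) with
          | none => simp
          | some m2 => by_cases hm2 : m2 < x <;> simp [hm2]
    · -- x is odd: even components unchanged, odd min/max updated
      rw [Bool.not_eq_true] at hx
      have hodd : ((PySem.Int.mod x 2 != 0) = true) := by
        simp only [bne, hx, Bool.not_false]
      simp only [List.filter_append, List.filter_cons, List.filter_nil, hx, hodd, if_true]
      rw [max?_id_append_singleton, min?_id_append_singleton]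
      simp only [isInertialStep, hx, Bool.false_eq_true, if_false]
      cases PySem.List.max? (List.filter (fun x => PySem.Int.mod x 2 != 0) l) (fun y => y) with
      | none =>
        cases PySem.List.min? (List.filter (fun x => PySem.Int.mod x 2 != 0) l) (fun y => y) with
        | none => simp
        | some mi => by_cases h : mi > x <;> simp [h] <;> omega
      | some ma =>
        cases PySem.List.min? (List.filter (fun x => PySem.Int.mod x 2 != 0) l) (fun y => y) with
        | none => by_cases h : ma < x <;> simp [h] <;> omega
        | some mi =>
          by_cases h1 : ma < x <;> by_cases h2 : mi > x <;> simp [h1, h2] <;> omega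

-- ===== VERDICT (by name: the statement is the Claim_ definition above) =====
theorem is_inertial_spec : Claim_equal_is_inertial := by
  intro arr _
  unfold Spec_is_inertial is_inertial is_inertial_alt
  rw [fold_state_eq]
  simp only []
  cases hE : PySem.List.max? (arr.filter (fun x => PySem.Int.mod x 2 == 0)) (fun y => y) with
  | none =>
    have he : arr.filter (fun x => PySem.Int.mod x 2 == 0) = [] :=
      (PySem.List.max?_eq_none_iff _ _).mp hE
    rw [he]
    cases PySem.List.max? (arr.filter (fun x => PySem.Int.mod x 2 != 0)) (fun y => y) <;>
      cases PySem.List.min? (arr.filter (fun x => PySem.Int.mod x 2 != 0)) (fun y => y) <;>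
      simp
  | some m1 =>
    have hene : (arr.filter (fun x => PySem.Int.mod x 2 == 0)).isEmpty = false := by
      rw [List.isEmpty_eq_false_iff]
      intro h
      rw [h] at hE
      simp [PySem.List.max?] at hE
    by_cases ho : arr.filter (fun x => PySem.Int.mod x 2 != 0) = []
    · have hMa : PySem.List.max? (arr.filter (fun x => PySem.Int.mod x 2 != 0)) (fun y => y)
          = none := (PySem.List.max?_eq_none_iff _ _).mpr ho
      have hMi : PySem.List.min? (arr.filter (fun x => PySem.Int.mod x 2 != 0)) (fun y => y)
          = none := (PySem.List.min?_eq_none_iff _ _).mpr ho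
      rw [hMa, hMi, ho]
      simp
    · have hoe : (arr.filter (fun x => PySem.Int.mod x 2 != 0)).isEmpty = false :=
        List.isEmpty_eq_false_iff.mpr ho
      cases hMa : PySem.List.max? (arr.filter (fun x => PySem.Int.mod x 2 != 0)) (fun y => y) with
      | none => exact absurd ((PySem.List.max?_eq_none_iff _ _).mp hMa) ho
      | some ma =>
        cases hMi : PySem.List.min? (arr.filter (fun x => PySem.Int.mod x 2 != 0)) (fun y => y) with
        | none => exact absurd ((PySem.List.min?_eq_none_iff _ _).mp hMi) ho
        | some mi =>
          rw [hene, hoe]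
          simp only [Option.elim_some, Bool.or_self, Bool.false_eq_true, if_false]
          unfold snd2
          rw [hE]
          simp only []
          cases (if 2 ≤ PySem.List.count (arr.filter (fun x => PySem.Int.mod x 2 == 0)) m1
              then some m1
              else PySem.List.max?
                ((arr.filter (fun x => PySem.Int.mod x 2 == 0)).filter (fun x => decide (x < m1)))
                (fun y => y)) <;> rfl
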